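-- pv_equiv track=rewrite | github.com/Gnome101/PSAT | services/effective_permissions.py | _normalize_abi_type
-- ===== SOURCE A (Python) =====
-- ELEMENTARY_TYPE_PREFIXES = (
--     "address",
--     "uint",
--     "int",
--     "bool",
--     "bytes",
--     "string",
--     "fixed",
--     "ufixed",
--     "tuple",
-- )
--
-- def _normalize_abi_type(type_name: str) -> str:
--     stripped = type_name.strip()
--     if not stripped:
--         return stripped
--
--     if stripped.endswith("]"):
--         base, suffix = stripped.split("[", 1)
--         return f"{_normalize_abi_type(base)}[{suffix}"
--
--     if stripped.startswith(ELEMENTARY_TYPE_PREFIXES):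
--         return stripped
--
--     return "address"
-- ===== SOURCE B (Python) =====
-- ELEMENTARY_TYPE_PREFIXES = (
--     "address",
--     "uint",
--     "int",
--     "bool",
--     "bytes",
--     "string",
--     "fixed",
--     "ufixed",
--     "tuple",
-- )
--
-- def _normalize_abi_type(type_name: str) -> str:
--     # iterative: peel array suffix chunks off the front base, then classify once
--     cur = type_name.strip()
--     chunks = []
--     while cur and cur.endswith("]"):
--         base, suffix = cur.split("[", 1)   # ValueError exactly where A raises
--         chunks.append("[" + suffix)
--         cur = base.strip()
--     if cur and not cur.startswith(ELEMENTARY_TYPE_PREFIXES):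
--         cur = "address"
--     return cur + "".join(reversed(chunks))
-- ===== Notes on version B (the rewrite author's own statement) =====
-- stated objective: alternative
-- what changed: Replaces A's tail recursion with an explicit iterative loop that peels '[...'-suffix chunks into a list while re-stripping the base, classifies the final base once, and concatenates the chunks in reverse order.
import Mathlib
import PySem

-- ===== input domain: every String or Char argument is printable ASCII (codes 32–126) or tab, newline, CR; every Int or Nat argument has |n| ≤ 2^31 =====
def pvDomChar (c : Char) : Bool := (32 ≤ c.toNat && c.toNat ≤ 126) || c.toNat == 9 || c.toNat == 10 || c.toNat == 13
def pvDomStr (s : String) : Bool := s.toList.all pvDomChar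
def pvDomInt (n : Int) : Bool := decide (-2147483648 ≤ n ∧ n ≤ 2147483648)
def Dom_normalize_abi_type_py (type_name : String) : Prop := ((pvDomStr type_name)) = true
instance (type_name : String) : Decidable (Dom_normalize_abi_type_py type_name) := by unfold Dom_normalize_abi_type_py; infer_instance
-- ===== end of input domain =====

-- B replaces A's tail recursion with an iterative suffix-chunk-peeling loop (alternative decomposition, same cost).


-- ===== PORT A =====
def pvElementaryPrefixes : List (List Char) :=
  ["address".toList, "uint".toList, "int".toList, "bool".toList, "bytes".toList,
   "string".toList, "fixed".toList, "ufixed".toList, "tuple".toList]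

-- stripped.startswith(ELEMENTARY_TYPE_PREFIXES): a tuple argument means "any of these prefixes"
def pvStartsElem (s : List Char) : Bool :=
  pvElementaryPrefixes.any (fun p => PySem.Chars.startswith s p)

-- literal transliteration of A's recursion; fuel only makes the recursion total (it never runs out
-- on inputs where Python returns); the `_ => []` split arm is where Python raises ValueError (outside Pre_)
def normAuxA : Nat → List Char → List Char
  | 0, _ => []
  | fuel+1, cs =>
    let stripped := PySem.Chars.strip cs
    if stripped = [] then stripped
    else if PySem.Chars.endswith stripped [']'] then
      match PySem.Chars.splitOnMax stripped ['['] 1 with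
      | [base, suffix] => normAuxA fuel base ++ '[' :: suffix
      | _ => []
    else if pvStartsElem stripped then stripped
    else "address".toList

def normalize_abi_type_py (type_name : String) : String :=
  String.ofList (normAuxA (type_name.toList.length + 1) type_name.toList)

-- ===== PORT B =====
-- the while loop of Source B; state = (cur, chunks); the `_ => ([], chunks)` arm is Python's ValueError (outside Pre_)
def normLoopB : Nat → List Char → List (List Char) → List Char × List (List Char)
  | 0, cur, chunks => (cur, chunks)
  | fuel+1, cur, chunks =>
    if (!cur.isEmpty) && PySem.Chars.endswith cur [']'] then
      match PySem.Chars.splitOnMax cur ['['] 1 with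
      | [base, suffix] => normLoopB fuel (PySem.Chars.strip base) (chunks ++ ['[' :: suffix])
      | _ => ([], chunks)
    else (cur, chunks)

def normalize_abi_type_py_alt (type_name : String) : String :=
  let st := normLoopB (type_name.toList.length + 1) (PySem.Chars.strip type_name.toList) []
  let cur := if (!st.1.isEmpty) && (!pvStartsElem st.1) then "address".toList else st.1
  String.ofList (cur ++ PySem.Chars.join [] st.2.reverse)

-- ===== PRECONDITION & SPEC =====
-- Pre_ excludes exactly the inputs on which Python A raises ValueError (a ']'-terminated stripped
-- string with no '[' to split on, at the top level or in the re-stripped base); B raises there too.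
def Pre_normalize_abi_type_py (type_name : String) : Prop :=
  let s := PySem.Chars.strip type_name.toList
  PySem.Chars.endswith s [']'] = true →
    ('[' ∈ s ∧
     PySem.Chars.endswith (PySem.Chars.strip (s.takeWhile (· != '['))) [']'] = false)
instance (type_name : String) : Decidable (Pre_normalize_abi_type_py type_name) := by
  unfold Pre_normalize_abi_type_py; infer_instance

def pvWitness_normalize_abi_type_py : String := "uint256[2][]"

def Spec_normalize_abi_type_py (type_name : String) (out : String) : Prop := out = normalize_abi_type_py_alt type_name
instance (type_name : String) (out : String) : Decidable (Spec_normalize_abi_type_py type_name out) := by unfold Spec_normalize_abi_type_py; infer_instance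

-- ===== CLAIM (what is proved, stated in full; the proofs are below) =====
def Claim_equal_normalize_abi_type_py : Prop := ∀ (type_name : String), Dom_normalize_abi_type_py type_name → Pre_normalize_abi_type_py type_name → Spec_normalize_abi_type_py type_name (normalize_abi_type_py type_name)

-- ===== LEMMAS AND PROOFS =====

-- split(sep, 1) tail: with m = 0 the loop emits the rest as the last piece, whatever the fuel
theorem go_m0 (fuel : Nat) (l cur : List Char) (acc : List (List Char)) :
    PySem.Chars.splitOnMax.go ['['] fuel 0 l cur acc = ((cur.reverse ++ l) :: acc).reverse := by
  cases fuel with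
  | zero => simp [PySem.Chars.splitOnMax.go]
  | succ f => cases l with
    | nil => simp [PySem.Chars.splitOnMax.go]
    | cons c rest => simp [PySem.Chars.splitOnMax.go]

theorem go_m1 (l : List Char) : ∀ (fuel : Nat), l.length < fuel → ∀ (cur : List Char) (acc : List (List Char)),
    PySem.Chars.splitOnMax.go ['['] fuel 1 l cur acc =
      if '[' ∈ l then
        (((l.dropWhile (· != '[')).tail) :: (cur.reverse ++ l.takeWhile (· != '[')) :: acc).reverse
      else ((cur.reverse ++ l) :: acc).reverse := by
  induction l with
  | nil =>
    intro fuel h cur acc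
    cases fuel with
    | zero => omega
    | succ f => simp [PySem.Chars.splitOnMax.go]
  | cons c rest ih =>
    intro fuel h cur acc
    cases fuel with
    | zero => simp at h
    | succ f =>
      by_cases hc : c = '['
      · subst hc
        simp [PySem.Chars.splitOnMax.go, List.isPrefixOf, go_m0]
      · have hrl : rest.length < f := by simp at h; omega
        have hcc : ¬ (('[' : Char) = c) := fun e => hc e.symm
        by_cases hm : '[' ∈ rest <;>
          simp [PySem.Chars.splitOnMax.go, List.isPrefixOf, hc, hcc, ih f hrl, hm]

-- s.split("[", 1): one piece if '[' is absent (Python's unpacking then raises), else the two pieces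
theorem split1 (s : List Char) :
    PySem.Chars.splitOnMax s ['['] 1 =
      if '[' ∈ s then [s.takeWhile (· != '['), (s.dropWhile (· != '[')).tail] else [s] := by
  have h : s.length < s.length + 1 := by omega
  by_cases hm : '[' ∈ s <;>
    simp [PySem.Chars.splitOnMax, go_m1 s (s.length + 1) h, hm]

-- the common "classify the base" step both programs end with
def pvFinal (x : List Char) : List Char :=
  if x = [] then [] else if pvStartsElem x then x else "address".toList

theorem final_eq (x : List Char) :
    (if (!x.isEmpty) && (!pvStartsElem x) then "address".toList else x) = pvFinal x := by
  cases x with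
  | nil => simp [pvFinal]
  | cons c r => by_cases h : pvStartsElem (c :: r) <;> simp [pvFinal, h]

-- A without entering the recursive branch
theorem normAuxA_no_rec (fuel : Nat) (cs : List Char)
    (h : PySem.Chars.endswith (PySem.Chars.strip cs) [']'] = false) :
    normAuxA (fuel+1) cs = pvFinal (PySem.Chars.strip cs) := by
  by_cases he : PySem.Chars.strip cs = []
  · simp [normAuxA, he, pvFinal]
  · by_cases hs : pvStartsElem (PySem.Chars.strip cs) <;> simp [normAuxA, he, h, hs, pvFinal]

-- A's one recursive step when the stripped string ends with ']' and the split succeeds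
theorem normAuxA_step (fuel : Nat) (cs : List Char)
    (hsne : PySem.Chars.strip cs ≠ [])
    (hend : PySem.Chars.endswith (PySem.Chars.strip cs) [']'] = true)
    (hmem : '[' ∈ PySem.Chars.strip cs) :
    normAuxA (fuel+1) cs =
      normAuxA fuel ((PySem.Chars.strip cs).takeWhile (· != '[')) ++
        '[' :: ((PySem.Chars.strip cs).dropWhile (· != '[')).tail := by
  simp [normAuxA, hsne, hend, split1, hmem]

-- under Pre_, B's loop body runs exactly once
theorem normLoopB_two (fuel : Nat) (s : List Char)
    (hsne : s ≠ [])
    (hend : PySem.Chars.endswith s [']'] = true)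
    (hmem : '[' ∈ s)
    (hb : PySem.Chars.endswith (PySem.Chars.strip (s.takeWhile (· != '['))) [']'] = false) :
    normLoopB (fuel+2) s [] =
      (PySem.Chars.strip (s.takeWhile (· != '[')), ['[' :: (s.dropWhile (· != '[')).tail]) := by
  simp [normLoopB, hsne, hend, split1, hmem, hb]

theorem main_equiv : ∀ (t : String), Pre_normalize_abi_type_py t →
    normalize_abi_type_py t = normalize_abi_type_py_alt t := by
  intro t hpre
  unfold normalize_abi_type_py normalize_abi_type_py_alt
  simp only []
  by_cases hend : PySem.Chars.endswith (PySem.Chars.strip t.toList) [']'] = true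
  · obtain ⟨hmem, hb⟩ := hpre hend
    have hsne : PySem.Chars.strip t.toList ≠ [] := by
      intro e; rw [e] at hend; simp [PySem.Chars.endswith] at hend
    have hcsne : t.toList ≠ [] := by
      intro e; exact hsne (by rw [e]; rfl)
    have hlen : t.toList.length + 1 = (t.toList.length - 1) + 2 := by
      have := List.length_pos_of_ne_nil hcsne; omega
    rw [hlen]
    rw [show ((t.toList.length - 1) + 2) = ((t.toList.length - 1) + 1) + 1 from rfl,
        normAuxA_step _ _ hsne hend hmem,
        normAuxA_no_rec _ _ hb,
        normLoopB_two _ _ hsne hend hmem hb]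
    rw [final_eq]
    simp [PySem.Chars.join, List.intercalate]
  · have hend' : PySem.Chars.endswith (PySem.Chars.strip t.toList) [']'] = false := by
      simpa using hend
    rw [normAuxA_no_rec _ _ hend']
    simp only [normLoopB, hend', Bool.and_false, Bool.false_eq_true, if_false]
    rw [final_eq]
    simp [PySem.Chars.join, List.intercalate]

-- ===== VERDICT (by name: the statement is the Claim_ definition above) =====
theorem normalize_abi_type_py_spec : Claim_equal_normalize_abi_type_py := by
  intro t _ hpre
  exact main_equiv t hpre
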